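-- pv_equiv track=rewrite | github.com/eder3232/ivp-asignaciones-financieras-v2 | src/010_metodo_numerico_corrector.py | fusionar_diccionarios
-- ===== SOURCE A (Python) =====
-- def fusionar_diccionarios(diccionario_de_diccionarios):
--     """
--     Fusiona diccionarios separados en un diccionario unificado.
--     Solo incluye claves donde ambos valores sean diferentes de cero.
--     Usa dinámicamente las claves del diccionario de entrada.
--
--     Args:
--         diccionario_de_diccionarios (dict): Diccionario con estructura:
--             {
--                 "nombre_campo1": {clave: valor, ...},
--                 "nombre_campo2": {clave: valor, ...}
--             }
--
--     Returns:
--         dict: Diccionario fusionado con estructura {clave: {nombre_campo1: valor, nombre_campo2: valor}}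
--     """
--     # Obtener las claves (nombres de los campos) del diccionario principal
--     nombres_campos = list(diccionario_de_diccionarios.keys())
--
--     if len(nombres_campos) != 2:
--         raise ValueError("El diccionario debe contener exactamente 2 campos")
--
--     campo1_nombre = nombres_campos[0]
--     campo2_nombre = nombres_campos[1]
--
--     campo1_datos = diccionario_de_diccionarios[campo1_nombre]
--     campo2_datos = diccionario_de_diccionarios[campo2_nombre]
--
--     fusionado = {}
--
--     # Obtener todas las claves únicas de ambos diccionarios
--     todas_las_claves = set(campo1_datos.keys()) | set(campo2_datos.keys())
--
--     for clave in todas_las_claves: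
--         valor1 = campo1_datos.get(clave, 0)
--         valor2 = campo2_datos.get(clave, 0)
--
--         # Solo agregar si ambos valores son diferentes de cero
--         if valor1 != 0 and valor2 != 0:
--             fusionado[clave] = {campo1_nombre: valor1, campo2_nombre: valor2}
--
--     return fusionado
-- ===== SOURCE B (Python) =====
-- def fusionar_diccionarios(diccionario_de_diccionarios):
--     try:
--         (campo1_nombre, campo1_datos), (campo2_nombre, campo2_datos) = diccionario_de_diccionarios.items()
--     except ValueError:
--         raise ValueError("El diccionario debe contener exactamente 2 campos")
--     return {
--         clave: {campo1_nombre: valor1, campo2_nombre: campo2_datos.get(clave, 0)}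
--         for clave, valor1 in campo1_datos.items()
--         if valor1 != 0 and campo2_datos.get(clave, 0) != 0
--     }
-- ===== Notes on version B (the rewrite author's own statement) =====
-- stated objective: simpler
-- what changed: Instead of building the union of both key sets and probing both dicts with .get(...,0) defaults, B destructures the two items and emits the result as a single dict comprehension over the first sub-dict only, since a surviving key must be nonzero (hence present) in both dicts.
import Mathlib
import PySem

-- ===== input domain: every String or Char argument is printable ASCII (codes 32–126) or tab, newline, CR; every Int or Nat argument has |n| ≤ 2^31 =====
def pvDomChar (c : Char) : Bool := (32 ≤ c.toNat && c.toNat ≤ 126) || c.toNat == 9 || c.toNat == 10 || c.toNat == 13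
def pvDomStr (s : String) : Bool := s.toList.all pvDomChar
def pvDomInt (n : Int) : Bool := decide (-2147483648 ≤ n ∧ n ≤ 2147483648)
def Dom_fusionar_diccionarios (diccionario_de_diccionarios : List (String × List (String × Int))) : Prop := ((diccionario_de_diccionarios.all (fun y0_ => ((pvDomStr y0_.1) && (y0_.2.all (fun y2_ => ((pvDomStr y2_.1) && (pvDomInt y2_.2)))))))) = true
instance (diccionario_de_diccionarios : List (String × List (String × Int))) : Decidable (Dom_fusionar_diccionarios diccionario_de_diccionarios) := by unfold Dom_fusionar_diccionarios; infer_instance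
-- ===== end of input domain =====

-- B merges the two sub-dicts by a single comprehension over the first sub-dict's items
-- instead of A's union-of-key-sets with .get(...,0) defaults; objective: simpler.
-- (A's iteration order over the Python set is hash-dependent; dict outputs are compared as dicts.)

-- ===== PORT A =====
def fusionar_diccionarios (diccionario_de_diccionarios : List (String × List (String × Int))) : List (String × List (String × Int)) :=
  let nombres := diccionario_de_diccionarios.map (·.1)
  if nombres.length = 2 then
    let campo1_nombre := nombres.headD ""
    let campo2_nombre := (nombres.drop 1).headD ""
    let campo1_datos := (PySem.Dict.mk diccionario_de_diccionarios).getD campo1_nombre []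
    let campo2_datos := (PySem.Dict.mk diccionario_de_diccionarios).getD campo2_nombre []
    let todas_las_claves := PySem.Set.union (PySem.Set.ofList (campo1_datos.map (·.1))) (campo2_datos.map (·.1))
    (todas_las_claves.foldl (fun fusionado clave =>
       let valor1 := (PySem.Dict.mk campo1_datos).getD clave 0
       let valor2 := (PySem.Dict.mk campo2_datos).getD clave 0
       if valor1 ≠ 0 ∧ valor2 ≠ 0 then
         fusionado.insert clave (((PySem.Dict.empty.insert campo1_nombre valor1).insert campo2_nombre valor2).items)
       else fusionado) PySem.Dict.empty).items
  else []  -- Python raises ValueError here; excluded by Pre_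

-- ===== PORT B =====
def fusionar_diccionarios_alt (diccionario_de_diccionarios : List (String × List (String × Int))) : List (String × List (String × Int)) :=
  match diccionario_de_diccionarios with
  | [(campo1_nombre, campo1_datos), (campo2_nombre, campo2_datos)] =>
    (campo1_datos.foldl (fun acc kv =>
        let valor2 := (PySem.Dict.mk campo2_datos).getD kv.1 0
        if kv.2 ≠ 0 ∧ valor2 ≠ 0 then
          acc.insert kv.1 (PySem.Dict.ofList [(campo1_nombre, kv.2), (campo2_nombre, valor2)]).items
        else acc)
      PySem.Dict.empty).items
  | _ => []  -- the unpacking raises ValueError; excluded by Pre_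

-- ===== PRECONDITION & SPEC =====
-- Pre_ excludes inputs where A raises ValueError (not exactly 2 fields) and association
-- lists with duplicate keys, which do not represent any Python dict input.
def Pre_fusionar_diccionarios (diccionario_de_diccionarios : List (String × List (String × Int))) : Prop :=
  diccionario_de_diccionarios.length = 2 ∧
  (diccionario_de_diccionarios.map (·.1)).Nodup ∧
  ∀ p ∈ diccionario_de_diccionarios, (p.2.map (·.1)).Nodup
instance (diccionario_de_diccionarios : List (String × List (String × Int))) : Decidable (Pre_fusionar_diccionarios diccionario_de_diccionarios) := by unfold Pre_fusionar_diccionarios; infer_instance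

def pvWitness_fusionar_diccionarios : (List (String × List (String × Int))) :=
  [("a", [("x", 1), ("y", 0)]), ("b", [("x", 2), ("z", 3)])]

def Spec_fusionar_diccionarios (diccionario_de_diccionarios : List (String × List (String × Int))) (out : List (String × List (String × Int))) : Prop := out = fusionar_diccionarios_alt diccionario_de_diccionarios
instance (diccionario_de_diccionarios : List (String × List (String × Int))) (out : List (String × List (String × Int))) : Decidable (Spec_fusionar_diccionarios diccionario_de_diccionarios out) := by unfold Spec_fusionar_diccionarios; infer_instance

-- ===== CLAIM (what is proved, stated in full; the proofs are below) =====
def Claim_equal_fusionar_diccionarios : Prop := ∀ (diccionario_de_diccionarios : List (String × List (String × Int))), Dom_fusionar_diccionarios diccionario_de_diccionarios → Pre_fusionar_diccionarios diccionario_de_diccionarios → Spec_fusionar_diccionarios diccionario_de_diccionarios (fusionar_diccionarios diccionario_de_diccionarios)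

-- ===== LEMMAS AND PROOFS =====

lemma filter_foldl_add (P : String → Bool) :
    ∀ (t s : List String), (∀ x ∈ t, P x = false ∨ x ∈ s) →
      List.filter P (t.foldl PySem.Set.add s) = List.filter P s := by
  intro t
  induction t with
  | nil => intro s _; rfl
  | cons x t ih =>
    intro s h
    simp only [List.foldl_cons]
    have hmono : ∀ y ∈ t, P y = false ∨ y ∈ PySem.Set.add s x := by
      intro y hy
      rcases h y (List.mem_cons_of_mem _ hy) with hf | hm
      · exact Or.inl hf
      · refine Or.inr ?_
        simp only [PySem.Set.add]
        split <;> simp [hm]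
    rw [ih _ hmono]
    by_cases hx : s.contains x = true
    · have hxs : x ∈ s := by simpa using hx
      simp [PySem.Set.add, hxs]
    · have hxm : x ∉ s := by simpa using hx
      have hPx : P x = false := by
        rcases h x List.mem_cons_self with hf | hm
        · exact hf
        · exact absurd hm hxm
      simp [PySem.Set.add, hxm, List.filter_append, hPx]

lemma items_foldl_cond_insert {α ν : Type} (key : α → String) (P : α → Prop)
    [DecidablePred P] (val : α → ν) :
    ∀ (L : List α) (acc : PySem.Dict String ν),
      (L.map key).Nodup → (∀ a ∈ L, acc.contains (key a) = false) →
      (L.foldl (fun d a => if P a then d.insert (key a) (val a) else d) acc).items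
        = acc.items ++ (L.filter (fun a => decide (P a))).map (fun a => (key a, val a)) := by
  intro L
  induction L with
  | nil => intro acc _ _; simp
  | cons a L ih =>
    intro acc hnd hacc
    simp only [List.map_cons, List.nodup_cons, List.mem_map] at hnd
    obtain ⟨hka, hnd'⟩ := hnd
    simp only [List.foldl_cons]
    by_cases hP : P a
    · have hfresh : ∀ b ∈ L, (acc.insert (key a) (val a)).contains (key b) = false := by
        intro b hb
        rw [PySem.Dict.contains_insert]
        have : ¬ key b = key a := fun e => hka ⟨b, hb, e⟩
        simp [this, hacc b (List.mem_cons_of_mem _ hb)]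
      rw [if_pos hP, ih _ hnd' hfresh,
          PySem.Dict.items_insert_of_not_contains _ _ (hacc a List.mem_cons_self)]
      simp [hP]
    · rw [if_neg hP, ih _ hnd' (fun b hb => hacc b (List.mem_cons_of_mem _ hb))]
      simp [hP]


-- ===== VERDICT (by name: the statement is the Claim_ definition above) =====
lemma inner_items (c1 c2 : String) (hne : c1 ≠ c2) (v1 v2 : Int) :
    ((PySem.Dict.empty.insert c1 v1).insert c2 v2).items
      = (PySem.Dict.ofList [(c1, v1), (c2, v2)]).items := by
  have h1 : (PySem.Dict.empty (κ := String) (ν := Int)).contains c1 = false :=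
    PySem.Dict.contains_empty c1
  have h2 : ((PySem.Dict.empty.insert c1 v1) : PySem.Dict String Int).contains c2 = false := by
    rw [PySem.Dict.contains_insert]
    simp [hne.symm]
  simp [PySem.Dict.ofList, PySem.Dict.update,
    PySem.Dict.items_insert_of_not_contains _ _ h1,
    PySem.Dict.items_insert_of_not_contains _ _ h2]


theorem fusionar_diccionarios_spec : Claim_equal_fusionar_diccionarios := by
  intro d hDom hPre
  obtain ⟨hlen, hnodup, hinner⟩ := hPre
  rcases d with _ | ⟨⟨c1, d1⟩, _ | ⟨⟨c2, d2⟩, _ | ⟨r, rest⟩⟩⟩ <;>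
    simp only [List.length_cons, List.length_nil] at hlen
  · omega
  · omega
  have hne : c1 ≠ c2 := by
    simp only [List.map_cons, List.map_nil, List.nodup_cons] at hnodup
    simpa using hnodup.1
  have hd1 : (d1.map Prod.fst).Nodup := hinner _ List.mem_cons_self
  show fusionar_diccionarios _ = fusionar_diccionarios_alt _
  unfold fusionar_diccionarios fusionar_diccionarios_alt
  simp only [List.map_cons, List.map_nil, List.length_cons, List.length_nil,
    List.headD, List.drop, if_true]
  have hkeysnd : (PySem.Dict.mk [(c1, d1), (c2, d2)]).keys.Nodup := by
    simp [PySem.Dict.keys_mk, hne]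
  have e1 : (PySem.Dict.mk [(c1, d1), (c2, d2)]).getD c1 [] = d1 :=
    PySem.Dict.getD_of_mem_items _ (by simp) hkeysnd []
  have e2 : (PySem.Dict.mk [(c1, d1), (c2, d2)]).getD c2 [] = d2 :=
    PySem.Dict.getD_of_mem_items _ (by simp) hkeysnd []
  rw [e1, e2]
  have hk1 : (d1.map (fun x => x.1)).Nodup := hd1
  rw [PySem.Set.ofList_eq_self_of_nodup _ hk1]
  have hU : (PySem.Set.union (d1.map (fun x => x.1)) (d2.map (fun x => x.1))).Nodup :=
    PySem.Set.nodup_union _ _ hk1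
  have hA := items_foldl_cond_insert (ν := List (String × Int)) (fun k => k)
      (fun clave => (PySem.Dict.mk d1).getD clave 0 ≠ 0 ∧ (PySem.Dict.mk d2).getD clave 0 ≠ 0)
      (fun clave => ((PySem.Dict.empty.insert c1 ((PySem.Dict.mk d1).getD clave 0)).insert c2
          ((PySem.Dict.mk d2).getD clave 0)).items)
      (PySem.Set.union (d1.map (fun x => x.1)) (d2.map (fun x => x.1))) PySem.Dict.empty
      (by simpa using hU) (by simp)
  have hd1' : (d1.map Prod.fst).Nodup := hd1
  have hB := items_foldl_cond_insert (ν := List (String × Int)) (Prod.fst)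
      (fun kv => kv.2 ≠ 0 ∧ (PySem.Dict.mk d2).getD kv.1 0 ≠ 0)
      (fun kv => (PySem.Dict.ofList [(c1, kv.2), (c2, (PySem.Dict.mk d2).getD kv.1 0)]).items)
      d1 PySem.Dict.empty hd1' (by simp)
  refine hA.trans (Eq.trans ?_ hB.symm)
  simp only [List.nil_append, PySem.Dict.empty]
  have hmk1keys : (PySem.Dict.mk d1).keys = d1.map (fun x => x.1) := by
    simp [PySem.Dict.keys]
  have hcontains1 : ∀ x : String, x ∉ d1.map (fun y => y.1) → (PySem.Dict.mk d1).contains x = false := by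
    intro x hx
    rw [PySem.Dict.contains_eq_decide_mem_keys, hmk1keys]
    simpa using hx
  have hunion_eq : PySem.Set.union (d1.map (fun x => x.1)) (d2.map (fun x => x.1))
      = (d2.map (fun x => x.1)).foldl PySem.Set.add (d1.map (fun x => x.1)) := rfl
  rw [hunion_eq, filter_foldl_add _ _ _ ?side]
  case side =>
    intro x hx
    by_cases hxk : x ∈ d1.map (fun y => y.1)
    · exact Or.inr hxk
    · left
      simp [PySem.Dict.getD_of_not_contains _ _ (hcontains1 x hxk)]
  rw [List.filter_map, List.map_map]
  have hmknd1 : (PySem.Dict.mk d1).keys.Nodup := by simpa [PySem.Dict.keys] using hk1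
  have hget : ∀ kv ∈ d1, (PySem.Dict.mk d1).getD kv.1 0 = kv.2 := by
    intro kv hkv
    exact PySem.Dict.getD_of_mem_items _ (by simpa using hkv) hmknd1 0
  have hfc : List.filter ((fun a => decide ((PySem.Dict.mk d1).getD a 0 ≠ 0 ∧ (PySem.Dict.mk d2).getD a 0 ≠ 0)) ∘ (fun x => x.1)) d1
      = List.filter (fun a => decide (a.2 ≠ 0 ∧ (PySem.Dict.mk d2).getD a.1 0 ≠ 0)) d1 := by
    refine List.filter_congr ?_
    intro kv hkv
    simp only [Function.comp]
    rw [hget kv hkv]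
  rw [hfc]
  refine List.map_congr_left ?_
  intro kv hkv
  have hkv' := List.mem_of_mem_filter hkv
  simp only [Function.comp]
  rw [hget kv hkv']
  exact congrArg (fun l => (kv.1, l)) (inner_items c1 c2 hne kv.2 _)
  omega
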